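-- pv_equiv track=rewrite | github.com/ilkercankaya/LeetCodeAndHackerRankSolutions | LeetCode/Medium/1182.Shortest_Distance_to_Target_Color.py | shortestDistanceColor
-- ===== SOURCE A (Python) =====
-- import collections
-- import bisect
--
-- def shortestDistanceColor(colors, queries):
--     colorDic = collections.defaultdict(list)
--
--     for i, color in enumerate(colors):
--         colorDic[color].append(i)
--
--     results = []
--
--     for i, color in queries:
--         if color not in colorDic:
--             results.append(-1)
--             continue
--
--         index = bisect.bisect_left(colorDic[color], i)
--
--         if index >= len(colorDic[color]):
--             results.append(i - colorDic[color][-1])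
--         else:
--             results.append(min(abs(i - colorDic[color][index]), abs(i - colorDic[color][index - 1])))
--
--     return results
-- ===== SOURCE B (Python) =====
-- def shortestDistanceColor(colors, queries):
--     # One direct pass per query: the answer is simply the minimum |i - j|
--     # over all positions j holding the queried color (-1 if the color is absent).
--     return [min((abs(i - j) for j, c in enumerate(colors) if c == color), default=-1)
--             for i, color in queries]
-- ===== Notes on version B (the rewrite author's own statement) =====
-- stated objective: simpler
-- what changed: Replaces the color->sorted-index dictionary plus per-query bisect with a single comprehension that takes the minimum distance over all matching positions directly (min with default=-1), removing the index map and the binary-search/edge-case logic.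
import Mathlib
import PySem

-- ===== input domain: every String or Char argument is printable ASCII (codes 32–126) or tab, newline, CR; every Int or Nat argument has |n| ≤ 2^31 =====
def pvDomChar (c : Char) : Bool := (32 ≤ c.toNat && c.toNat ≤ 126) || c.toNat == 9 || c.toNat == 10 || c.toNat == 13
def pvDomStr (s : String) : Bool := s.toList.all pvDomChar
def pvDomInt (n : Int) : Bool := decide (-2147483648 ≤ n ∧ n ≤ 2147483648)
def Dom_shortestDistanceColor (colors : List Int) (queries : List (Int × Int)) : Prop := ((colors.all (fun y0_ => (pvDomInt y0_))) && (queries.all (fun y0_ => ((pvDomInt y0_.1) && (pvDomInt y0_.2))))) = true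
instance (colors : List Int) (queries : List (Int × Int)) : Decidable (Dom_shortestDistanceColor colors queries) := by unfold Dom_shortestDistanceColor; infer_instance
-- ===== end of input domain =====

-- B replaces A's color->index dictionary + per-query binary search by a direct
-- minimum-distance comprehension per query: simpler, same return value everywhere.


-- ===== PORT A =====
-- colorDic = defaultdict(list); for i, color in enumerate(colors): colorDic[color].append(i)
def buildColorDic (colors : List Int) : PySem.Dict Int (List Int) :=
  (PySem.List.enumerate colors 0).foldl
    (fun d p => d.modify p.2 [] (fun l => l ++ [p.1])) PySem.Dict.empty

def shortestDistanceColor (colors : List Int) (queries : List (Int × Int)) : List Int :=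
  let colorDic := buildColorDic colors
  queries.foldl
    (fun results q =>
      let i := q.1
      let color := q.2
      if ¬ colorDic.contains color then
        results ++ [-1]
      else
        let occ := colorDic.getD color []
        let index := PySem.List.bisectLeft occ i
        if (index : Int) ≥ (occ.length : Int) then
          results ++ [i - PySem.List.pyGetD occ (-1) 0]
        else
          results ++ [min |i - PySem.List.pyGetD occ (index : Int) 0|
                          |i - PySem.List.pyGetD occ ((index : Int) - 1) 0|])
    []

-- ===== PORT B =====
-- [min((abs(i - j) for j, c in enumerate(colors) if c == color), default=-1) for i, color in queries]
def shortestDistanceColor_alt (colors : List Int) (queries : List (Int × Int)) : List Int :=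
  queries.map (fun q =>
    PySem.List.minD
      ((PySem.List.enumerate colors 0).filterMap
        (fun p => if p.2 = q.2 then some |q.1 - p.1| else none))
      (fun x => x) (-1))

-- ===== PRECONDITION & SPEC =====
def Spec_shortestDistanceColor (colors : List Int) (queries : List (Int × Int)) (out : List Int) : Prop := out = shortestDistanceColor_alt colors queries
instance (colors : List Int) (queries : List (Int × Int)) (out : List Int) : Decidable (Spec_shortestDistanceColor colors queries out) := by unfold Spec_shortestDistanceColor; infer_instance

-- ===== CLAIM (what is proved, stated in full; the proofs are below) =====
def Claim_equal_shortestDistanceColor : Prop := ∀ (colors : List Int) (queries : List (Int × Int)), Dom_shortestDistanceColor colors queries → Spec_shortestDistanceColor colors queries (shortestDistanceColor colors queries)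

-- ===== LEMMAS AND PROOFS =====

-- the ascending list of indices at which `color` occurs
def occList (colors : List Int) (color : Int) : List Int :=
  (PySem.List.enumerate colors 0).filterMap
    (fun p => if p.2 = color then some p.1 else none)

theorem getD_buildColorDic_gen (ps : List (Int × Int)) (d : PySem.Dict Int (List Int)) (c : Int) :
    (ps.foldl (fun d p => d.modify p.2 [] (fun l => l ++ [p.1])) d).getD c []
    = d.getD c [] ++ ps.filterMap (fun p => if p.2 = c then some p.1 else none) := by
  induction ps generalizing d with
  | nil => simp
  | cons p rest ih =>
    simp only [List.foldl_cons, List.filterMap_cons, ih]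
    by_cases h : p.2 = c
    · simp [h, PySem.Dict.getD_modify_self]
    · have hne : c ≠ p.2 := fun hh => h hh.symm
      simp [h, PySem.Dict.getD_modify_of_ne _ _ _ hne]

theorem contains_buildColorDic_gen (ps : List (Int × Int)) (d : PySem.Dict Int (List Int)) (c : Int) :
    (ps.foldl (fun d p => d.modify p.2 [] (fun l => l ++ [p.1])) d).contains c
    = (d.contains c || !(ps.filterMap (fun p => if p.2 = c then some p.1 else none)).isEmpty) := by
  induction ps generalizing d with
  | nil => simp
  | cons p rest ih =>
    simp only [List.foldl_cons, List.filterMap_cons, ih, PySem.Dict.contains_modify]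
    by_cases h : p.2 = c
    · simp [h]
    · have hne : c ≠ p.2 := fun hh => h hh.symm
      rw [show (c == p.2) = false from beq_eq_false_iff_ne.mpr hne, Bool.false_or]
      simp [h]

theorem occList_sorted (colors : List Int) (color : Int) :
    (occList colors color).Pairwise (· < ·) := by
  apply List.Pairwise.filterMap _ _ (PySem.List.pairwise_lt_enumerate colors 0)
  intro a a' h b hb b' hb'
  by_cases ha : a.2 = color <;> simp [ha] at hb
  by_cases ha' : a'.2 = color <;> simp [ha'] at hb'
  omega

-- monotonicity of a strictly ascending list
theorem sorted_mono {occ : List Int} (hs : occ.Pairwise (· < ·))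
    {j j' : Nat} (hj' : j' < occ.length) (h : j ≤ j') : occ[j]'(by omega) ≤ occ[j'] := by
  rcases lt_or_eq_of_le h with h | h
  · exact le_of_lt ((List.pairwise_iff_getElem.mp hs) j j' (by omega) hj' h)
  · subst h; exact le_refl _

theorem minD_eq_of {xs : List Int} {x : Int} (d : Int)
    (hmem : x ∈ xs) (hmin : ∀ y ∈ xs, x ≤ y) :
    PySem.List.minD xs (fun y => y) d = x := by
  unfold PySem.List.minD
  cases hm : PySem.List.min? xs (fun y => y) with
  | none => exact absurd ((PySem.List.min?_eq_none_iff xs _).mp hm ▸ hmem) (by simp)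
  | some m =>
    have h1 := PySem.List.min?_isMin hm x hmem
    have h2 := hmin m (PySem.List.min?_mem hm)
    simpa using le_antisymm h1 h2

-- the heart: on a strictly ascending nonempty list, A's bisect-based answer is the min distance
theorem bisect_answer (occ : List Int) (i : Int) (hs : occ.Pairwise (· < ·)) (hne : occ ≠ []) :
    (if ((PySem.List.bisectLeft occ i : Int)) ≥ (occ.length : Int) then
        i - PySem.List.pyGetD occ (-1) 0
      else
        min |i - PySem.List.pyGetD occ ((PySem.List.bisectLeft occ i : Nat) : Int) 0|
            |i - PySem.List.pyGetD occ (((PySem.List.bisectLeft occ i : Nat) : Int) - 1) 0|)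
    = PySem.List.minD (occ.map (fun j => |i - j|)) (fun x => x) (-1) := by
  have hsle : occ.Pairwise (· ≤ ·) := hs.imp le_of_lt
  obtain ⟨hk_le, hlt, hge⟩ := PySem.List.bisectLeft_spec occ i hsle
  set k := PySem.List.bisectLeft occ i with hk
  have hlen : 0 < occ.length := List.length_pos_iff.mpr hne
  have hmem : ∀ j (hj : j < occ.length),
      |i - occ[j]| ∈ occ.map (fun j => |i - j|) :=
    fun j hj => List.mem_map.mpr ⟨occ[j], List.getElem_mem hj, rfl⟩
  by_cases hcase : k = occ.length
  · -- all occurrences lie strictly left of i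
    have hmax : ∀ j (hj : j < occ.length), occ[j] < i := fun j hj => hlt j hj (by omega)
    rw [if_pos (by exact_mod_cast le_of_eq hcase.symm)]
    rw [PySem.List.pyGetD_neg_one occ 0 hne, List.getLast_eq_getElem]
    refine (minD_eq_of _ ?_ ?_).symm
    · have h1 := hmax (occ.length - 1) (by omega)
      have : |i - occ[occ.length - 1]| = i - occ[occ.length - 1] := abs_of_nonneg (by omega)
      exact this ▸ hmem _ _
    · intro y hy
      obtain ⟨x, hx, rfl⟩ := List.mem_map.mp hy
      obtain ⟨j, hj, rfl⟩ := List.mem_iff_getElem.mp hx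
      have h1 := hmax j hj
      have h2 : occ[j] ≤ occ[occ.length - 1] := sorted_mono hs (by omega) (by omega)
      have h3 : |i - occ[j]| = i - occ[j] := abs_of_nonneg (by omega)
      omega
  · have hklt : k < occ.length := lt_of_le_of_ne hk_le hcase
    rw [if_neg (by omega)]
    have hkget : PySem.List.pyGetD occ (k : Int) 0 = occ[k] := by
      rw [PySem.List.pyGetD_natCast, List.getD_eq_getElem _ _ hklt]
    have hge_k : i ≤ occ[k] := hge k hklt (le_refl _)
    by_cases h0 : k = 0
    · -- no occurrence lies left of i: occ[-1] wraps to the last element, but occ[0] wins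
      have hallge : ∀ j (hj : j < occ.length), i ≤ occ[j] := fun j hj => hge j hj (by omega)
      simp only [h0] at hkget ⊢
      rw [hkget]
      have hlast : ((0 : Nat) : Int) - 1 = (-1 : Int) := by norm_num
      rw [hlast, PySem.List.pyGetD_neg_one occ 0 hne, List.getLast_eq_getElem]
      have hge0 : i ≤ occ[0] := hallge 0 (by omega)
      refine (minD_eq_of _ ?_ ?_).symm
      · -- the minimum of the two is |i - occ[0]|
        have h2 : occ[0] ≤ occ[occ.length - 1] := sorted_mono hs (by omega) (by omega)
        have e1 : |i - occ[0]| = occ[0] - i := by rw [abs_sub_comm]; exact abs_of_nonneg (by omega)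
        have h3 := hallge (occ.length - 1) (by omega)
        have e2 : |i - occ[occ.length - 1]| = occ[occ.length - 1] - i := by
          rw [abs_sub_comm]; exact abs_of_nonneg (by omega)
        have heq : min |i - occ[0]| |i - occ[occ.length - 1]| = |i - occ[0]| := by
          rw [min_eq_left]; omega
        rw [heq]; exact hmem 0 (by omega)
      · intro y hy
        obtain ⟨x, hx, rfl⟩ := List.mem_map.mp hy
        obtain ⟨j, hj, rfl⟩ := List.mem_iff_getElem.mp hx
        have h2 : occ[0] ≤ occ[j] := sorted_mono hs hj (by omega)
        have h3 := hallge j hj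
        have e1 : |i - occ[0]| = occ[0] - i := by rw [abs_sub_comm]; exact abs_of_nonneg (by omega)
        have e2 : |i - occ[j]| = occ[j] - i := by rw [abs_sub_comm]; exact abs_of_nonneg (by omega)
        have h4 : occ[0] ≤ occ[occ.length - 1] := sorted_mono hs (by omega) (by omega)
        have h5 := hallge (occ.length - 1) (by omega)
        have e3 : |i - occ[occ.length - 1]| = occ[occ.length - 1] - i := by
          rw [abs_sub_comm]; exact abs_of_nonneg (by omega)
        omega
    · -- occ[k-1] < i ≤ occ[k]: the two bisect neighbours bracket i
      have hk1 : k - 1 < occ.length := by omega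
      have hprevget : PySem.List.pyGetD occ ((k : Int) - 1) 0 = occ[k - 1] := by
        have : ((k : Int) - 1) = ((k - 1 : Nat) : Int) := by omega
        rw [this, PySem.List.pyGetD_natCast, List.getD_eq_getElem _ _ hk1]
      have hprevlt : occ[k - 1] < i := hlt (k - 1) hk1 (by omega)
      rw [hkget, hprevget]
      have ea : |i - occ[k]| = occ[k] - i := by rw [abs_sub_comm]; exact abs_of_nonneg (by omega)
      have eb : |i - occ[k - 1]| = i - occ[k - 1] := abs_of_nonneg (by omega)
      refine (minD_eq_of _ ?_ ?_).symm
      · rcases le_total |i - occ[k]| |i - occ[k - 1]| with h | h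
        · rw [min_eq_left h]; exact hmem k hklt
        · rw [min_eq_right h]; exact hmem (k - 1) hk1
      · intro y hy
        obtain ⟨x, hx, rfl⟩ := List.mem_map.mp hy
        obtain ⟨j, hj, rfl⟩ := List.mem_iff_getElem.mp hx
        by_cases hjk : j < k
        · have h2 : occ[j] ≤ occ[k - 1] := sorted_mono hs hk1 (by omega)
          have h3 : occ[j] < i := hlt j hj hjk
          have e2 : |i - occ[j]| = i - occ[j] := abs_of_nonneg (by omega)
          have := min_le_right |i - occ[k]| |i - occ[k - 1]|
          omega
        · have h2 : occ[k] ≤ occ[j] := sorted_mono hs hj (by omega)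
          have h3 : i ≤ occ[j] := hge j hj (by omega)
          have e2 : |i - occ[j]| = occ[j] - i := by rw [abs_sub_comm]; exact abs_of_nonneg (by omega)
          have := min_le_left |i - occ[k]| |i - occ[k - 1]|
          omega

-- A's per-query answer, as one expression (used only in the proofs below)
def aAns (colors : List Int) (q : Int × Int) : Int :=
  if ¬ (buildColorDic colors).contains q.2 then (-1 : Int)
  else
    let occ := (buildColorDic colors).getD q.2 []
    let index := PySem.List.bisectLeft occ q.1
    if (index : Int) ≥ (occ.length : Int) then q.1 - PySem.List.pyGetD occ (-1) 0
    else min |q.1 - PySem.List.pyGetD occ (index : Int) 0|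
             |q.1 - PySem.List.pyGetD occ ((index : Int) - 1) 0|

-- per-query equality
theorem query_eq (colors : List Int) (q : Int × Int) :
    aAns colors q
    = PySem.List.minD
        ((PySem.List.enumerate colors 0).filterMap
          (fun p => if p.2 = q.2 then some |q.1 - p.1| else none))
        (fun x => x) (-1) := by
  have hmapeq : (PySem.List.enumerate colors 0).filterMap
        (fun p => if p.2 = q.2 then some |q.1 - p.1| else none)
      = (occList colors q.2).map (fun j => |q.1 - j|) := by
    rw [occList, List.map_filterMap]
    congr 1
    funext p
    by_cases h : p.2 = q.2 <;> simp [h]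
  have hcont : (buildColorDic colors).contains q.2 = !(occList colors q.2).isEmpty := by
    unfold buildColorDic
    rw [contains_buildColorDic_gen]
    simp [occList]
  have hgetD : (buildColorDic colors).getD q.2 [] = occList colors q.2 := by
    unfold buildColorDic
    rw [getD_buildColorDic_gen]
    simp [occList]
  rw [hmapeq]
  by_cases hocc : occList colors q.2 = []
  · rw [aAns, if_pos (by simp [hcont, hocc])]
    simp [hocc, PySem.List.minD, PySem.List.min?]
  · rw [aAns, if_neg (by simp [hcont, hocc])]
    simp only [hgetD]
    exact bisect_answer (occList colors q.2) q.1 (occList_sorted colors q.2) hocc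

-- ===== VERDICT (by name: the statement is the Claim_ definition above) =====
theorem shortestDistanceColor_spec : Claim_equal_shortestDistanceColor := by
  intro colors queries _
  unfold Spec_shortestDistanceColor shortestDistanceColor shortestDistanceColor_alt
  have hstep : (fun (results : List Int) (q : Int × Int) =>
      if ¬ (buildColorDic colors).contains q.2 then results ++ [-1]
      else
        let occ := (buildColorDic colors).getD q.2 []
        let index := PySem.List.bisectLeft occ q.1
        if (index : Int) ≥ (occ.length : Int) then
          results ++ [q.1 - PySem.List.pyGetD occ (-1) 0]
        else
          results ++ [min |q.1 - PySem.List.pyGetD occ (index : Int) 0|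
                          |q.1 - PySem.List.pyGetD occ ((index : Int) - 1) 0|])
      = fun results q => results ++ [aAns colors q] := by
    funext results q
    by_cases h1 : (buildColorDic colors).contains q.2
    · by_cases h2 : ((PySem.List.bisectLeft ((buildColorDic colors).getD q.2 []) q.1 : Int)
          ≥ (((buildColorDic colors).getD q.2 []).length : Int)) <;>
        simp [aAns, h1, h2]
    · simp [aAns, h1]
  show queries.foldl _ [] = _
  rw [hstep, PySem.List.foldl_append_singleton_eq_map, List.nil_append]
  exact List.map_congr_left (fun q _ => query_eq colors q)
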